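-- pv_equiv track=rewrite | github.com/posl/comment_recommendation | script/split_gen/2_time/zh/132_A/6.py | isTwoChar
-- ===== SOURCE A (Python) =====
-- def isTwoChar(s):
--     if len(s) != 4:
--         return False
--     if len(set(s)) != 2:
--         return False
--     for c in set(s):
--         if s.count(c) != 2:
--             return False
--     return True
-- ===== SOURCE B (Python) =====
-- def isTwoChar(s):
--     counts = {}
--     for c in s:
--         counts[c] = counts.get(c, 0) + 1
--     return sorted(counts.values()) == [2, 2]
-- ===== Notes on version B (the rewrite author's own statement) =====
-- stated objective: simpler
-- what changed: Replaced the length check, the distinct-count check and the per-character counting loop by one frequency-dict build followed by a single comparison sorted(counts.values()) == [2, 2].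
import Mathlib
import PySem

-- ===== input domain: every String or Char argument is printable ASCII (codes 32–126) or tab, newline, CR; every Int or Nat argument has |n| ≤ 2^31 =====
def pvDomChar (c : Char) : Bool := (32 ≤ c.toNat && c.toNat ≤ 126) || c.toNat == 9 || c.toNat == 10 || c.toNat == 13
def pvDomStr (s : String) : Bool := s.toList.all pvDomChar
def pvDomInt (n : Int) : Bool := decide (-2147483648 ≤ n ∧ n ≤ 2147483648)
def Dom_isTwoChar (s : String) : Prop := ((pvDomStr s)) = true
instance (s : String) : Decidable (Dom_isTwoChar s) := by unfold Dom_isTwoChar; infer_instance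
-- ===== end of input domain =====

-- B replaces A's length / distinct-count / per-character-count checks by one frequency-dict
-- build followed by a single sorted(values) == [2, 2] comparison (objective: simpler).


-- ===== PORT A =====
-- 'for c in set(s): if s.count(c) != 2: return False' / final 'return True'
def isTwoCharLoop (s : String) : List Char → Bool
  | [] => true
  | c :: rest => if PySem.Str.count s (String.mk [c]) ≠ 2 then false else isTwoCharLoop s rest

def isTwoChar (s : String) : Bool :=
  if PySem.Str.len s ≠ 4 then false
  else if PySem.Set.len (PySem.Set.ofList s.toList) ≠ 2 then false
  else isTwoCharLoop s (PySem.Set.ofList s.toList)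

-- ===== PORT B =====
def isTwoChar_alt (s : String) : Bool :=
  let counts := s.toList.foldl (fun d c => d.insert c (d.getD c 0 + 1)) (PySem.Dict.empty : PySem.Dict Char Int)
  decide (PySem.List.sorted (PySem.Dict.values counts) (fun x => x) false = [2, 2])

-- ===== PRECONDITION & SPEC =====
def Spec_isTwoChar (s : String) (out : Bool) : Prop := out = isTwoChar_alt s
instance (s : String) (out : Bool) : Decidable (Spec_isTwoChar s out) := by unfold Spec_isTwoChar; infer_instance

-- ===== CLAIM (what is proved, stated in full; the proofs are below) =====
def Claim_equal_isTwoChar : Prop := ∀ (s : String), Dom_isTwoChar s → Spec_isTwoChar s (isTwoChar s)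

-- ===== LEMMAS AND PROOFS =====

-- Python s.count(c) for a single character equals the character count of the list.
theorem countGo_singleton (c : Char) (l : List Char) (fuel acc : Nat) (h : l.length ≤ fuel) :
    PySem.Chars.count.go [c] fuel l acc = acc + l.count c := by
  induction l generalizing fuel acc with
  | nil => cases fuel <;> simp [PySem.Chars.count.go]
  | cons hd t ih =>
    cases fuel with
    | zero => simp at h
    | succ fuel =>
      have hle : t.length ≤ fuel := by simpa using h
      by_cases hc : c = hd
      · subst hc
        simp only [PySem.Chars.count.go, List.isPrefixOf, BEq.rfl, List.isPrefixOf_nil_left,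
          Bool.and_true, Bool.true_and, if_true, List.length_singleton, List.drop_succ_cons,
          List.drop_zero]
        rw [ih fuel (acc + 1) hle]
        simp [List.count_cons]; omega
      · have hcb : (c == hd) = false := by simp [hc]
        simp only [PySem.Chars.count.go, List.isPrefixOf, hcb, Bool.false_and, if_false]
        rw [ih fuel acc hle]
        have : (hd == c) = false := by simp [Ne.symm hc]
        simp [List.count_cons, this]

theorem strCount_singleton (s : String) (c : Char) :
    PySem.Str.count s (String.mk [c]) = s.toList.count c := by
  have h1 : (String.mk [c]).toList = [c] := Eq.symm (String.ofList_eq.mp rfl)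
  show PySem.Chars.count s.toList (String.mk [c]).toList = _
  rw [h1]
  simp only [PySem.Chars.count, List.isEmpty_cons, if_false]
  exact (countGo_singleton c s.toList s.toList.length 0 le_rfl).trans (by simp)

theorem loop_eq_all (s : String) (L : List Char) :
    isTwoCharLoop s L = L.all (fun c => s.toList.count c == 2) := by
  induction L with
  | nil => rfl
  | cons c rest ih =>
    simp only [isTwoCharLoop, strCount_singleton, List.all_cons, ih]
    by_cases h : s.toList.count c = 2 <;> simp [h]

theorem values_counter_char (xs : List Char) :
    (PySem.Dict.counter xs).values
      = (PySem.Set.ofList xs).map (fun k => (xs.count k : Int)) := by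
  show ((PySem.Dict.counter xs).items.map (·.2)) = _
  rw [PySem.Dict.items_counter]
  simp [List.map_map, Function.comp]

-- B is true iff the distinct characters are exactly two and each occurs twice.
theorem alt_iff (s : String) :
    isTwoChar_alt s = true ↔
      ((PySem.Set.ofList s.toList).length = 2 ∧
        ∀ c ∈ PySem.Set.ofList s.toList, s.toList.count c = 2) := by
  unfold isTwoChar_alt
  simp only [PySem.Dict.foldl_insert_getD_add_one_eq_counter]
  rw [decide_eq_true_iff, values_counter_char]
  set D := PySem.Set.ofList s.toList with hD
  constructor
  · intro h
    have hperm : (D.map (fun k => ((s.toList.count k : Int)))).Perm [2, 2] := by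
      rw [← h]; exact (PySem.List.sorted_perm _ _ _).symm
    have hlen : D.length = 2 := by
      have := hperm.length_eq; simpa using this
    refine ⟨hlen, fun c hc => ?_⟩
    have : ((s.toList.count c : Int)) ∈ D.map (fun k => ((s.toList.count k : Int))) :=
      List.mem_map_of_mem hc
    have h2 : ((s.toList.count c : Int)) ∈ ([2, 2] : List Int) := hperm.mem_iff.mp this
    simp at h2; exact_mod_cast h2
  · rintro ⟨hlen, hall⟩
    have : D.map (fun k => ((s.toList.count k : Int))) = [2, 2] := by
      match D, hlen with
      | [a, b], _ =>
        simp only [List.map_cons, List.map_nil]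
        rw [hall a (by simp), hall b (by simp)]
        norm_num
    rw [this]
    exact PySem.List.sorted_id_eq_of_perm_of_pairwise _ _ (List.Perm.refl _) (by decide)

-- two distinct characters, each occurring twice, force length 4
theorem length_eq_four (xs : List Char) (hlen : (PySem.Set.ofList xs).length = 2)
    (hall : ∀ c ∈ PySem.Set.ofList xs, xs.count c = 2) : xs.length = 4 := by
  have hperm : (PySem.Set.ofList xs).Perm xs.dedup :=
    (List.perm_ext_iff_of_nodup (PySem.Set.nodup_ofList xs) xs.nodup_dedup).mpr
      (fun a => by rw [PySem.Set.mem_ofList, List.mem_dedup])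
  have hsum := List.sum_map_count_dedup_eq_length xs
  have : ((PySem.Set.ofList xs).map (fun x => xs.count x)).sum = xs.length := by
    rw [(hperm.map _).sum_eq]; exact hsum
  match hD : PySem.Set.ofList xs, hlen with
  | [a, b], _ =>
    rw [hD] at this hall
    simp only [List.map_cons, List.map_nil, List.sum_cons, List.sum_nil] at this
    rw [hall a (by simp), hall b (by simp)] at this
    omega

-- ===== VERDICT (by name: the statement is the Claim_ definition above) =====
theorem isTwoChar_spec : Claim_equal_isTwoChar := by
  intro s _
  show isTwoChar s = isTwoChar_alt s
  unfold isTwoChar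
  have hlen : PySem.Str.len s = s.toList.length := by simp [PySem.Str.len, PySem.Chars.len]
  have hslen : PySem.Set.len (PySem.Set.ofList s.toList)
      = ((PySem.Set.ofList s.toList).length : Int) := rfl
  by_cases h4 : s.toList.length = 4
  · by_cases h2 : (PySem.Set.ofList s.toList).length = 2
    · rw [if_neg (by rw [hlen]; omega), if_neg (by rw [hslen]; exact_mod_cast by omega)]
      rw [loop_eq_all]
      by_cases hall : ∀ c ∈ PySem.Set.ofList s.toList, s.toList.count c = 2
      · rw [((alt_iff s).mpr ⟨h2, hall⟩ : _), List.all_eq_true.mpr (fun c hc => by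
          simp [hall c hc])]
      · push_neg at hall
        obtain ⟨c, hc, hne⟩ := hall
        have hB : isTwoChar_alt s ≠ true := fun h => hne (((alt_iff s).mp h).2 c hc)
        have hA : (PySem.Set.ofList s.toList).all (fun c => s.toList.count c == 2) ≠ true := by
          intro h
          exact hne (by simpa using List.all_eq_true.mp h c hc)
        simp only [Bool.not_eq_true] at hA hB
        rw [hA, hB]
    · rw [if_neg (by rw [hlen]; omega),
        if_pos (by rw [hslen]; exact_mod_cast fun h => h2 (by exact_mod_cast h))]
      symm
      simp only [Bool.eq_false_iff, ne_eq]
      intro hB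
      exact h2 ((alt_iff s).mp hB).1
  · rw [if_pos (by rw [hlen]; omega)]
    symm
    simp only [Bool.eq_false_iff, ne_eq]
    intro hB
    obtain ⟨h2, hall⟩ := (alt_iff s).mp hB
    exact h4 (length_eq_four _ h2 hall)
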